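-- pv_equiv track=rewrite | github.com/mkern75/AdventOfCodePython | year2023/Day18v2.py | solve
-- ===== SOURCE A (Python) =====
-- MOVE = {"L": (0, -1), "R": (0, 1), "U": (-1, 0), "D": (1, 0),
--         "2": (0, -1), "0": (0, 1), "3": (-1, 0), "1": (1, 0)}
--
-- def solve(instructions):
--     v = [(0, 0)]
--     for direction, distance in instructions[:-1]:
--         r, c = v[-1]
--         dr, dc = MOVE[direction]
--         v += [(r + distance * dr, c + distance * dc)]
--     n = len(v)
--
--     # https://en.wikipedia.org/wiki/Shoelace_formula &  https://en.wikipedia.org/wiki/Pick%27s_theorem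
--     area = abs(sum((v[i][1] + v[(i + 1) % n][1]) * (v[i][0] - v[(i + 1) % n][0]) for i in range(n))) // 2
--     boundary_points = sum(abs(v[i][0] - v[(i + 1) % n][0]) + abs(v[i][1] - v[(i + 1) % n][1]) for i in range(n))
--     interior_points = area + 1 - boundary_points // 2
--     return boundary_points + interior_points
-- ===== SOURCE B (Python) =====
-- MOVE = {"L": (0, -1), "R": (0, 1), "U": (-1, 0), "D": (1, 0),
--         "2": (0, -1), "0": (0, 1), "3": (-1, 0), "1": (1, 0)}
--
-- def solve(instructions):
--     # One-sided Green's theorem on a rectilinear path: only VERTICAL moves carry an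
--     # area term (-2*c*dr per step); horizontal moves only shift the column.  The
--     # answer is area + ceil(perimeter/2) + 1 directly, with no vertex list and no
--     # separate interior-point (Pick) computation.
--     r = c = 0
--     twice_area = 0
--     perimeter = 0
--     for direction, distance in instructions[:-1]:
--         dr, dc = MOVE[direction]
--         if dr:
--             twice_area += -2 * c * distance * dr
--             r += distance * dr
--         else:
--             c += distance * dc
--         perimeter += abs(distance)
--     # implicit closing edge from the final point back to the origin
--     twice_area += c * r
--     perimeter += abs(r) + abs(c)
--     return abs(twice_area) // 2 + (perimeter + 1) // 2 + 1
-- ===== Notes on version B (the rewrite author's own statement) =====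
-- stated objective: alternative
-- what changed: B drops A's vertex list and its two cyclic modular-index sums: using the one-sided Green form on the rectilinear path, only vertical moves accumulate an area term (-2*c*distance*dr), horizontal moves just shift the column, the perimeter is abs(distance) per move, and the result is abs(area2)//2 + ceil(perimeter/2) + 1 directly instead of A's separate Pick interior-point computation.
import Mathlib
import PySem

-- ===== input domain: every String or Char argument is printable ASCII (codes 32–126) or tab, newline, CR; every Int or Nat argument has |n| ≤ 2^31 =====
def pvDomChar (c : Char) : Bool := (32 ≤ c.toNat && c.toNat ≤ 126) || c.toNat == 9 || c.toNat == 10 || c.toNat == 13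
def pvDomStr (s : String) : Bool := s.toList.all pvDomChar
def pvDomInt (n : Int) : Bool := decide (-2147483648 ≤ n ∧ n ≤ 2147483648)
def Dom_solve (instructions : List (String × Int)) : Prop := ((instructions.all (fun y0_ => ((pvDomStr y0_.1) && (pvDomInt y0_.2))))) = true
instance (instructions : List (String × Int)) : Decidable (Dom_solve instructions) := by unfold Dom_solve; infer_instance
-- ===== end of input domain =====

-- B: no vertex list and no Pick split — one-sided Green accumulation on vertical
-- moves only, perimeter as abs(distance) per move, result = area + ceil(perim/2) + 1.

-- ===== PORT A =====
-- the module constant MOVE (shared by both Pythons verbatim)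
def pvMOVE : PySem.Dict String (Int × Int) :=
  PySem.Dict.ofList [("L", (0, -1)), ("R", (0, 1)), ("U", (-1, 0)), ("D", (1, 0)),
                     ("2", (0, -1)), ("0", (0, 1)), ("3", (-1, 0)), ("1", (1, 0))]

-- the two generator-expression terms of A (shoelace cross term, edge taxicab length)
def pvCross (a b : Int × Int) : Int := (a.2 + b.2) * (a.1 - b.1)
def pvDist (a b : Int × Int) : Int := |a.1 - b.1| + |a.2 - b.2|

-- the body of A's vertex-building loop: v += [(r + distance*dr, c + distance*dc)]
def pvStepA (v : List (Int × Int)) (ins : String × Int) : List (Int × Int) :=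
  let rc := PySem.List.pyGetD v (-1) ((0 : Int), (0 : Int))
  let dd := pvMOVE.getD ins.1 ((0 : Int), (0 : Int))
  v ++ [(rc.1 + ins.2 * dd.1, rc.2 + ins.2 * dd.2)]

def solve (instructions : List (String × Int)) : Int :=
  let v : List (Int × Int) :=
    (PySem.List.slice instructions none (some (-1))).foldl pvStepA [((0 : Int), (0 : Int))]
  let n : Int := v.length
  let area : Int := PySem.Int.floordiv
    (|(PySem.List.pyRange 0 n 1).foldl
        (fun s i => s + pvCross (PySem.List.pyGetD v i (0, 0))
                          (PySem.List.pyGetD v (PySem.Int.mod (i + 1) n) (0, 0))) 0|) 2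
  let boundary_points : Int :=
    (PySem.List.pyRange 0 n 1).foldl
      (fun s i => s + pvDist (PySem.List.pyGetD v i (0, 0))
                        (PySem.List.pyGetD v (PySem.Int.mod (i + 1) n) (0, 0))) 0
  let interior_points : Int := area + 1 - PySem.Int.floordiv boundary_points 2
  boundary_points + interior_points

-- ===== PORT B =====
-- B's loop body: state ((r, c), twice_area, perimeter); vertical moves carry the
-- one-sided area term -2*c*distance*dr, horizontal moves only shift c.
def pvStepB (st : (Int × Int) × Int × Int) (ins : String × Int) : (Int × Int) × Int × Int :=
  let dd := pvMOVE.getD ins.1 ((0 : Int), (0 : Int))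
  if dd.1 ≠ 0 then
    ((st.1.1 + ins.2 * dd.1, st.1.2),
     st.2.1 + (-2) * st.1.2 * ins.2 * dd.1, st.2.2 + |ins.2|)
  else
    ((st.1.1, st.1.2 + ins.2 * dd.2), st.2.1, st.2.2 + |ins.2|)

def solve_alt (instructions : List (String × Int)) : Int :=
  let st := (PySem.List.slice instructions none (some (-1))).foldl pvStepB
      (((0 : Int), (0 : Int)), (0 : Int), (0 : Int))
  let twice_area := st.2.1 + st.1.2 * st.1.1
  let perimeter := st.2.2 + |st.1.1| + |st.1.2|
  PySem.Int.floordiv (|twice_area|) 2 + PySem.Int.floordiv (perimeter + 1) 2 + 1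

-- ===== PRECONDITION & SPEC =====
-- A raises KeyError when a processed (non-last) instruction's direction is not a MOVE key.
def Pre_solve (instructions : List (String × Int)) : Prop :=
  ∀ p ∈ instructions.dropLast, p.1 ∈ (["L", "R", "U", "D", "2", "0", "3", "1"] : List String)
instance (instructions : List (String × Int)) : Decidable (Pre_solve instructions) := by
  unfold Pre_solve; infer_instance
def pvWitness_solve : (List (String × Int)) := [("R", 2), ("D", 2), ("L", 2), ("U", 2)]

def Spec_solve (instructions : List (String × Int)) (out : Int) : Prop := out = solve_alt instructions
instance (instructions : List (String × Int)) (out : Int) : Decidable (Spec_solve instructions out) := by unfold Spec_solve; infer_instance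

-- ===== CLAIM (what is proved, stated in full; the proofs are below) =====
def Claim_equal_solve : Prop := ∀ (instructions : List (String × Int)), Dom_solve instructions → Pre_solve instructions → Spec_solve instructions (solve instructions)

-- ===== LEMMAS AND PROOFS =====

-- the step from one vertex to the next
def pvNxt (p : Int × Int) (ins : String × Int) : Int × Int :=
  let dd := pvMOVE.getD ins.1 ((0 : Int), (0 : Int))
  (p.1 + ins.2 * dd.1, p.2 + ins.2 * dd.2)

-- the vertex list generated from start p by the moves
def pvPath (p : Int × Int) : List (String × Int) → List (Int × Int)
  | [] => [p]
  | x :: xs => p :: pvPath (pvNxt p x) xs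

-- sum of F over consecutive pairs
def pvAdj (F : (Int × Int) → (Int × Int) → Int) : List (Int × Int) → Int
  | [] => 0
  | [_] => 0
  | x :: y :: t => F x y + pvAdj F (y :: t)

theorem pvPath_ne_nil (p : Int × Int) (L : List (String × Int)) : pvPath p L ≠ [] := by
  cases L <;> simp [pvPath]

theorem pvPath_head (p : Int × Int) (L : List (String × Int)) :
    (pvPath p L).head (pvPath_ne_nil p L) = p := by
  cases L <;> simp [pvPath]

theorem pvAdj_cons_path (F : (Int × Int) → (Int × Int) → Int) (p q : Int × Int)
    (L : List (String × Int)) :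
    pvAdj F (p :: pvPath q L) = F p q + pvAdj F (pvPath q L) := by
  cases L <;> simp [pvPath, pvAdj]

theorem pvStepA_eq (v : List (Int × Int)) (p : Int × Int) (x : String × Int) :
    pvStepA (v ++ [p]) x = (v ++ [p]) ++ [pvNxt p x] := by
  simp [pvStepA, pvNxt, PySem.List.pyGetD_neg_one_append_singleton]

-- on a MOVE key, B's branching step advances by the same vertex step and adds
-- exactly A's cross term and edge length (Δr·Δc = 0 on an axis move)
theorem pvStepB_eq (p : Int × Int) (a b : Int) (x : String × Int)
    (hx : x.1 ∈ (["L", "R", "U", "D", "2", "0", "3", "1"] : List String)) :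
    pvStepB (p, a, b) x
      = (pvNxt p x, a + pvCross p (pvNxt p x), b + pvDist p (pvNxt p x)) := by
  obtain ⟨d, k⟩ := x
  have hL : pvMOVE.getD "L" ((0:Int),(0:Int)) = ((0:Int),(-1:Int)) := by decide
  have hR : pvMOVE.getD "R" ((0:Int),(0:Int)) = ((0:Int),(1:Int)) := by decide
  have hU : pvMOVE.getD "U" ((0:Int),(0:Int)) = ((-1:Int),(0:Int)) := by decide
  have hD : pvMOVE.getD "D" ((0:Int),(0:Int)) = ((1:Int),(0:Int)) := by decide
  have h2 : pvMOVE.getD "2" ((0:Int),(0:Int)) = ((0:Int),(-1:Int)) := by decide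
  have h0 : pvMOVE.getD "0" ((0:Int),(0:Int)) = ((0:Int),(1:Int)) := by decide
  have h3 : pvMOVE.getD "3" ((0:Int),(0:Int)) = ((-1:Int),(0:Int)) := by decide
  have h1 : pvMOVE.getD "1" ((0:Int),(0:Int)) = ((1:Int),(0:Int)) := by decide
  simp only [List.mem_cons, List.not_mem_nil, or_false] at hx
  rcases hx with h | h | h | h | h | h | h | h <;> subst h <;>
    simp [pvStepB, pvNxt, pvCross, pvDist, hL, hR, hU, hD, h2, h0, h3, h1] <;> exact Or.inl (by ring)

-- A's vertex-building loop produces pvPath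
theorem pvBuild (L : List (String × Int)) :
    ∀ (acc : List (Int × Int)) (p : Int × Int),
    L.foldl pvStepA (acc ++ [p]) = acc ++ pvPath p L := by
  induction L with
  | nil => intro acc p; simp [pvPath]
  | cons x xs ih =>
    intro acc p
    rw [List.foldl_cons, pvStepA_eq]
    have := ih (acc ++ [p]) (pvNxt p x)
    simp only [List.append_assoc] at this ⊢
    simpa [pvPath] using this

-- adjacency sum over getD-indexing (A's generator restricted to i < n-1)
theorem pvAdjIdx (F : (Int × Int) → (Int × Int) → Int) (v : List (Int × Int)) :
    ((List.range (v.length - 1)).map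
        (fun k => F (v.getD k (0, 0)) (v.getD (k + 1) (0, 0)))).sum = pvAdj F v := by
  induction v with
  | nil => simp [pvAdj]
  | cons x t ih =>
    cases t with
    | nil => simp [pvAdj]
    | cons y t' =>
      have h : (x :: y :: t').length - 1 = ((y :: t').length - 1) + 1 := by simp
      rw [h, List.range_succ_eq_map]
      simp only [List.map_cons, List.map_map, List.sum_cons]
      have h2 : ((List.range ((y :: t').length - 1)).map
          ((fun k => F ((x :: y :: t').getD k (0, 0)) ((x :: y :: t').getD (k + 1) (0, 0))) ∘
            (fun k => k + 1))).sum
          = ((List.range ((y :: t').length - 1)).map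
            (fun k => F ((y :: t').getD k (0, 0)) ((y :: t').getD (k + 1) (0, 0)))).sum := by
        apply congrArg; apply List.map_congr_left; intro k _; simp [Function.comp]
      rw [h2, ih]
      simp [pvAdj]

-- A's cyclic indexed sum equals adjacency sum plus the closing edge
theorem pvCyc (F : (Int × Int) → (Int × Int) → Int) (v : List (Int × Int)) (h : v ≠ []) :
    (PySem.List.pyRange 0 (v.length : Int) 1).foldl
        (fun s i => s + F (PySem.List.pyGetD v i (0, 0))
            (PySem.List.pyGetD v (PySem.Int.mod (i + 1) (v.length : Int)) (0, 0))) 0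
      = pvAdj F v + F (v.getLast h) (v.head h) := by
  rw [PySem.List.foldl_add, zero_add, PySem.List.pyRange_one]
  simp only [sub_zero, Int.toNat_natCast, List.map_map]
  have hterm : ∀ k ∈ List.range v.length,
      ((fun i => F (PySem.List.pyGetD v i (0, 0))
          (PySem.List.pyGetD v (PySem.Int.mod (i + 1) (v.length : Int)) (0, 0))) ∘
        (fun k : Nat => (0 : Int) + (k : Int))) k
      = F (v.getD k (0, 0)) (v.getD ((k + 1) % v.length) (0, 0)) := by
    intro k hk
    show F (PySem.List.pyGetD v ((0 : Int) + (k : Int)) (0, 0))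
        (PySem.List.pyGetD v (PySem.Int.mod (((0 : Int) + (k : Int)) + 1) (v.length : Int)) (0, 0))
      = _
    have h0 : (0 : Int) + (k : Int) = (k : Int) := by ring
    have h1 : (k : Int) + 1 = ((k + 1 : Nat) : Int) := by push_cast; ring
    rw [h0, h1, PySem.Int.mod_natCast, PySem.List.pyGetD_natCast, PySem.List.pyGetD_natCast]
  rw [List.map_congr_left hterm]
  have hn : v.length = (v.length - 1) + 1 := by
    cases v
    · simp at h
    · simp
  have hr : List.range v.length = List.range (v.length - 1) ++ [v.length - 1] := by
    conv_lhs => rw [hn]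
    rw [List.range_succ]
  rw [hr]
  simp only [List.map_append, List.map_cons, List.map_nil, List.sum_append, List.sum_cons,
    List.sum_nil, add_zero]
  have hlast : (v.getD (v.length - 1) (0, 0)) = v.getLast h := by
    rw [List.getLast_eq_getElem]
    exact List.getD_eq_getElem v (0, 0) (by omega)
  have hmodlast : (v.length - 1 + 1) % v.length = 0 := by
    rw [← hn]; exact Nat.mod_self _
  have hhead : v.getD 0 (0, 0) = v.head h := by
    cases v
    · simp at h
    · simp
  have hrest : ∀ k ∈ List.range (v.length - 1),
      F (v.getD k (0, 0)) (v.getD ((k + 1) % v.length) (0, 0))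
      = F (v.getD k (0, 0)) (v.getD (k + 1) (0, 0)) := by
    intro k hk
    rw [Nat.mod_eq_of_lt (by simp at hk; omega)]
  rw [List.map_congr_left hrest, pvAdjIdx, hmodlast, hlast, hhead]

-- B's fold invariant (under Pre_: every processed direction is a MOVE key)
theorem pvStream (L : List (String × Int))
    (hL : ∀ x ∈ L, x.1 ∈ (["L", "R", "U", "D", "2", "0", "3", "1"] : List String)) :
    ∀ (p : Int × Int) (a b : Int),
    L.foldl pvStepB (p, a, b)
      = ((pvPath p L).getLast (pvPath_ne_nil p L),
         a + pvAdj pvCross (pvPath p L), b + pvAdj pvDist (pvPath p L)) := by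
  induction L with
  | nil => intro p a b; simp [pvPath, pvAdj]
  | cons x xs ih =>
    intro p a b
    rw [List.foldl_cons, pvStepB_eq p a b x (hL x (by simp)),
      ih (fun y hy => hL y (by simp [hy])) (pvNxt p x)]
    have h1 : (pvPath p (x :: xs)).getLast (pvPath_ne_nil p (x :: xs))
        = (pvPath (pvNxt p x) xs).getLast (pvPath_ne_nil _ xs) := by
      simp only [pvPath]; exact List.getLast_cons (pvPath_ne_nil _ xs)
    have h2 := pvAdj_cons_path pvCross p (pvNxt p x) xs
    have h3 := pvAdj_cons_path pvDist p (pvNxt p x) xs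
    simp only [pvPath] at h1 h2 h3 ⊢
    rw [h1, h2, h3]
    refine Prod.ext rfl (Prod.ext ?_ ?_) <;> simp only [] <;> ring

-- ===== VERDICT (by name: the statement is the Claim_ definition above) =====
theorem solve_spec : Claim_equal_solve := by
  intro instructions _ hpre
  unfold Spec_solve solve solve_alt
  simp only []
  have hkeys : ∀ x ∈ PySem.List.slice instructions none (some (-1)),
      x.1 ∈ (["L", "R", "U", "D", "2", "0", "3", "1"] : List String) := by
    intro x hx
    exact hpre x (by simpa [PySem.List.slice_to_neg_one] using hx)
  have hv : (PySem.List.slice instructions none (some (-1))).foldl pvStepA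
        [((0 : Int), (0 : Int))]
      = pvPath (0, 0) (PySem.List.slice instructions none (some (-1))) := by
    have := pvBuild (PySem.List.slice instructions none (some (-1))) [] ((0 : Int), (0 : Int))
    simpa using this
  have hne := pvPath_ne_nil ((0 : Int), (0 : Int)) (PySem.List.slice instructions none (some (-1)))
  rw [hv, pvStream (PySem.List.slice instructions none (some (-1))) hkeys (0, 0) 0 0,
    pvCyc pvCross _ hne, pvCyc pvDist _ hne, pvPath_head]
  have hcross : ∀ (q : Int × Int), pvCross q (0, 0) = q.2 * q.1 := by
    intro q; simp [pvCross]
  have hdist : ∀ (q : Int × Int), pvDist q (0, 0) = |q.1| + |q.2| := by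
    intro q; simp [pvDist]
  rw [hcross, hdist]
  simp only [zero_add]
  -- abbreviate: A = |S|, b = perimeter; goal: b + (|S|//2 + 1 - b//2) = |S|//2 + (b+1)//2 + 1
  set S := pvAdj pvCross (pvPath (0, 0) (PySem.List.slice instructions none (some (-1))))
      + _ with hS
  set P := pvAdj pvDist (pvPath (0, 0) (PySem.List.slice instructions none (some (-1))))
      + _ with hP
  rw [PySem.Int.floordiv_eq_ediv_of_pos (by norm_num : (0:Int) < 2),
    PySem.Int.floordiv_eq_ediv_of_pos (by norm_num : (0:Int) < 2),
    PySem.Int.floordiv_eq_ediv_of_pos (by norm_num : (0:Int) < 2)]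
  omega
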